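-- pv_equiv track=rewrite | github.com/ArienYi/Picovoice_questions | Question2.py | find_word_combos_with_pronunciation
-- ===== SOURCE A (Python) =====
-- from typing import Sequence, List
-- from collections import defaultdict
--
-- def find_word_combos_with_pronunciation(phonemes: Sequence[str]) -> Sequence[Sequence[str]]:
--     # build an index from the first phoneme -> [(word, wordPhonemes), ...]
--     index_by_first = defaultdict(list)
--     for w, phns in dict_map.items():
--         if phns:
--             index_by_first[phns[0]].append((w, phns))
--
--     n = len(phonemes)
--     # memo[i] will store all decompositions of phonemes[i:]
--     memo = {}
--
--     def dfs(i: int) -> List[List[str]]: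
--         # we find a valid decomposition, no words needed from here on
--         if i == n:
--             return [[]]
--
--         # we reached a stored decomposition, no further manipulation needed
--         if i in memo:
--             return memo[i]
--
--         res = []
--         first_phoneme = phonemes[i]
--
--         # get all candidate words that start with this phoneme from index
--         candidates = index_by_first[first_phoneme]
--
--         for (word, word_phonemes) in candidates:
--             length_of_phns = len(word_phonemes)
--             # check if word_phonemes matches the chunk phonemes[i:i+length_of_word]
--             if i + length_of_phns <= n and phonemes[i: i + length_of_phns] == word_phonemes:
--                 # recurse on remainder
--                 sub_solutions = dfs(i + length_of_phns)
--                 # add 'word' to each sub-solution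
--                 for seq in sub_solutions:
--                     res.append([word] + seq)
--
--         memo[i] = res
--         return res
--
--     return dfs(0)
--
-- dict_map = {
--     "ABACUS": ["AE", "B", "AH", "K", "AH", "S"],
--     "BOOK": ["B", "UH", "K"],
--     "THEIR": ["DH", "EH", "R"],
--     "THERE": ["DH", "EH", "R"],
--     "TOMATO1": ["T", "AH", "M", "AA", "T", "OW"],
--     "TOMATO2": ["T", "AH", "M", "EY", "T", "OW"],
-- }
-- ===== SOURCE B (Python) =====
-- from collections import defaultdict
--
-- dict_map = {
--     "ABACUS": ["AE", "B", "AH", "K", "AH", "S"],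
--     "BOOK": ["B", "UH", "K"],
--     "THEIR": ["DH", "EH", "R"],
--     "THERE": ["DH", "EH", "R"],
--     "TOMATO1": ["T", "AH", "M", "AA", "T", "OW"],
--     "TOMATO2": ["T", "AH", "M", "EY", "T", "OW"],
-- }
--
-- def find_word_combos_with_pronunciation(phonemes):
--     # same first-phoneme index as A
--     index_by_first = defaultdict(list)
--     for w, phns in dict_map.items():
--         if phns:
--             index_by_first[phns[0]].append((w, phns))
--
--     n = len(phonemes)
--     # bottom-up tabulation: table[i] = all decompositions of phonemes[i:]
--     table = {n: [[]]}
--     for i in range(n - 1, -1, -1):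
--         row = []
--         for (word, word_phonemes) in index_by_first[phonemes[i]]:
--             length = len(word_phonemes)
--             if i + length <= n and phonemes[i:i + length] == word_phonemes:
--                 for seq in table[i + length]:
--                     row.append([word] + seq)
--         table[i] = row
--     return table[0]
-- ===== Notes on version B (the rewrite author's own statement) =====
-- stated objective: alternative
-- what changed: Replaced the recursive memoized dfs with an explicit bottom-up dynamic-programming table built from position n down to 0; rows are combined by iterating candidates in index order so the result list is identical.
import Mathlib
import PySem

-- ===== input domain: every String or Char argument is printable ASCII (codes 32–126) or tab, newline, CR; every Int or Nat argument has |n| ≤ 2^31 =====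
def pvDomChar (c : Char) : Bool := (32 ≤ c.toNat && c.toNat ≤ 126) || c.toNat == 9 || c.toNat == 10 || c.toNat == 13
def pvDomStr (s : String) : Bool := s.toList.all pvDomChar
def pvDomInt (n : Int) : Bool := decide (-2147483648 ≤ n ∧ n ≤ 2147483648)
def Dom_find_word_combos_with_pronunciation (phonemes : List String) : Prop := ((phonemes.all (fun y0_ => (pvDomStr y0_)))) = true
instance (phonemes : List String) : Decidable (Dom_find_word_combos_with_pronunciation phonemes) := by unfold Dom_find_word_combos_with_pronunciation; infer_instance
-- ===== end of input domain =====

-- B replaces A's memoized top-down dfs by an explicit bottom-up DP table (same result order); alternative decomposition, no speed claim.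
-- A's memo dict is omitted in the port: dfs is pure, the memo only avoids recomputing identical values and never changes the result.

-- the module-level pronunciation dictionary (insertion order)
def dict_map : List (String × List String) :=
  [("ABACUS", ["AE", "B", "AH", "K", "AH", "S"]),
   ("BOOK", ["B", "UH", "K"]),
   ("THEIR", ["DH", "EH", "R"]),
   ("THERE", ["DH", "EH", "R"]),
   ("TOMATO1", ["T", "AH", "M", "AA", "T", "OW"]),
   ("TOMATO2", ["T", "AH", "M", "EY", "T", "OW"])]

-- index_by_first: defaultdict(list) with append, built identically by A and B
def index_by_first : PySem.Dict String (List (String × List String)) :=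
  dict_map.foldl
    (fun d wp =>
      match wp.2 with
      | [] => d
      | p :: _ => d.insert p (d.getD p [] ++ [wp]))
    PySem.Dict.empty

-- ===== PORT A =====
mutual
-- dfs(i); the '0 < len' conjunct is a totalization guard only: the index never stores an empty pronunciation
def dfsA (ph : List String) (n : Nat) (i : Nat) : List (List String) :=
  if i = n then [[]]
  else loopA ph n i (index_by_first.getD (ph.getD i "") [])
termination_by (n - i, 1, 0)
decreasing_by exact Prod.Lex.right _ (Prod.Lex.left _ _ (by omega))

-- the 'for (word, word_phonemes) in candidates' loop accumulating res
def loopA (ph : List String) (n : Nat) (i : Nat) (cands : List (String × List String)) : List (List String) :=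
  match cands with
  | [] => []
  | (word, wp) :: rest =>
    (if _h : 0 < wp.length ∧ i + wp.length ≤ n ∧
        PySem.List.slice ph (some (i : Int)) (some ((i : Int) + (wp.length : Int))) = wp
     then (dfsA ph n (i + wp.length)).map (fun seq => word :: seq) else [])
    ++ loopA ph n i rest
termination_by (n - i, 0, cands.length)
decreasing_by
  · exact Prod.Lex.left _ _ (by omega)
  · exact Prod.Lex.right _ (Prod.Lex.right _ (by simp))
end

def find_word_combos_with_pronunciation (phonemes : List String) : List (List String) :=
  dfsA phonemes phonemes.length 0

-- ===== PORT B =====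
-- the inner 'for (word, word_phonemes) in candidates' loop building row by appends
def rowB (ph : List String) (table : PySem.Dict Nat (List (List String))) (i : Nat) : List (List String) :=
  (index_by_first.getD (ph.getD i "") []).foldl
    (fun row wp =>
      if 0 < wp.2.length ∧ i + wp.2.length ≤ ph.length ∧
          PySem.List.slice ph (some (i : Int)) (some ((i : Int) + (wp.2.length : Int))) = wp.2
      then row ++ (table.getD (i + wp.2.length) []).map (fun seq => wp.1 :: seq) else row)
    []

-- one iteration of 'for i in range(n-1, -1, -1)': table[i] = row
def stepB (ph : List String) (table : PySem.Dict Nat (List (List String))) (i : Nat) :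
    PySem.Dict Nat (List (List String)) :=
  table.insert i (rowB ph table i)

def find_word_combos_with_pronunciation_alt (phonemes : List String) : List (List String) :=
  let n := phonemes.length
  -- table = {n: [[]]}, then i = n-1, …, 0  (range(n-1,-1,-1) is (List.range n).reverse)
  let table := ((List.range n).reverse).foldl (stepB phonemes)
    ((PySem.Dict.empty : PySem.Dict Nat (List (List String))).insert n [[]])
  table.getD 0 []

-- ===== PRECONDITION & SPEC =====
def Spec_find_word_combos_with_pronunciation (phonemes : List String) (out : List (List String)) : Prop := out = find_word_combos_with_pronunciation_alt phonemes
instance (phonemes : List String) (out : List (List String)) : Decidable (Spec_find_word_combos_with_pronunciation phonemes out) := by unfold Spec_find_word_combos_with_pronunciation; infer_instance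

-- ===== CLAIM (what is proved, stated in full; the proofs are below) =====
def Claim_equal_find_word_combos_with_pronunciation : Prop := ∀ (phonemes : List String), Dom_find_word_combos_with_pronunciation phonemes → Spec_find_word_combos_with_pronunciation phonemes (find_word_combos_with_pronunciation phonemes)

-- ===== LEMMAS AND PROOFS =====

-- 'table is correct from position k up to n'
def Good (ph : List String) (table : PySem.Dict Nat (List (List String))) (k : Nat) : Prop :=
  ∀ j, k ≤ j → j ≤ ph.length → table.getD j [] = dfsA ph ph.length j

theorem rowB_eq_loopA (ph : List String) (table : PySem.Dict Nat (List (List String))) (i : Nat)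
    (hg : Good ph table (i + 1)) (cands : List (String × List String)) (acc : List (List String)) :
    cands.foldl
      (fun row wp =>
        if 0 < wp.2.length ∧ i + wp.2.length ≤ ph.length ∧
            PySem.List.slice ph (some (i : Int)) (some ((i : Int) + (wp.2.length : Int))) = wp.2
        then row ++ (table.getD (i + wp.2.length) []).map (fun seq => wp.1 :: seq) else row)
      acc = acc ++ loopA ph ph.length i cands := by
  induction cands generalizing acc with
  | nil => simp [loopA.eq_def]
  | cons c rest ih =>
    obtain ⟨word, wp⟩ := c
    rw [List.foldl_cons, ih]
    by_cases h : 0 < wp.length ∧ i + wp.length ≤ ph.length ∧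
        PySem.List.slice ph (some (i : Int)) (some ((i : Int) + (wp.length : Int))) = wp
    · have ht := hg (i + wp.length) (by omega) h.2.1
      rw [if_pos h, ht]
      conv_rhs => rw [loopA.eq_def]
      simp [dif_pos h]
    · rw [if_neg h]
      conv_rhs => rw [loopA.eq_def]
      simp [dif_neg h]

theorem good_step (ph : List String) (table : PySem.Dict Nat (List (List String))) (k : Nat)
    (hk : k < ph.length) (hg : Good ph table (k + 1)) : Good ph (stepB ph table k) k := by
  intro j hj1 hj2
  unfold stepB
  rw [PySem.Dict.getD_insert]
  by_cases hjk : j = k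
  · subst hjk
    simp only [if_true]
    unfold rowB
    rw [rowB_eq_loopA ph table j hg]
    rw [dfsA.eq_def]
    simp only [if_neg (by omega : ¬ j = ph.length), List.nil_append]
  · rw [if_neg hjk]
    exact hg j (by omega) hj2

theorem good_fold (ph : List String) (k : Nat) (hk : k ≤ ph.length) :
    ∀ table, Good ph table k →
      Good ph (((List.range k).reverse).foldl (stepB ph) table) 0 := by
  induction k with
  | zero => intro table hg; simpa using hg
  | succ k ih =>
    intro table hg
    rw [List.range_succ, List.reverse_append, List.reverse_singleton, List.singleton_append,
        List.foldl_cons]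
    exact ih (by omega) _ (good_step ph table k (by omega) hg)

-- ===== VERDICT (by name: the statement is the Claim_ definition above) =====
theorem find_word_combos_with_pronunciation_spec : Claim_equal_find_word_combos_with_pronunciation := by
  intro ph _
  unfold Spec_find_word_combos_with_pronunciation
  unfold find_word_combos_with_pronunciation find_word_combos_with_pronunciation_alt
  have h0 : Good ph ((PySem.Dict.empty : PySem.Dict Nat (List (List String))).insert ph.length [[]])
      ph.length := by
    intro j hj1 hj2
    have hje : j = ph.length := by omega
    subst hje
    rw [PySem.Dict.getD_insert_self, dfsA.eq_def]
    simp
  have := good_fold ph ph.length le_rfl _ h0 0 (by omega) (by omega)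
  simpa using this.symm
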